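-- pv_equiv track=rewrite | github.com/yepyhun/Hemu | gsd-review-pack/phase-16/16_build_outcome.py | _dominant
-- ===== SOURCE A (Python) =====
-- def _dominant(counter: dict[str, int]) -> tuple[str, int, bool]:
--     filtered = {str(k): int(v) for k, v in (counter or {}).items() if str(k)}
--     if not filtered:
--         return "", 0, False
--     ordered = sorted(filtered.items(), key=lambda item: (-item[1], item[0]))
--     top_name, top_count = ordered[0]
--     tied = len(ordered) > 1 and int(ordered[1][1]) == int(top_count)
--     return top_name, int(top_count), tied
-- ===== SOURCE B (Python) =====
-- def _dominant(counter: dict[str, int]) -> tuple[str, int, bool]: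
--     filtered = {str(k): int(v) for k, v in (counter or {}).items() if str(k)}
--     best = None  # (best_name, best_count, tie_count)
--     for name, count in filtered.items():
--         if best is None or count > best[1]:
--             best = (name, count, 1)
--         elif count == best[1]:
--             best = (min(name, best[0]), count, best[2] + 1)
--     if best is None:
--         return "", 0, False
--     return best[0], best[1], best[2] > 1
-- ===== Notes on version B (the rewrite author's own statement) =====
-- stated objective: faster
-- what changed: B replaces A's full sort of the filtered items by a single left-to-right reduction keeping (best name, best count, tie count) and returning tie_count > 1, instead of inspecting the first two sorted elements.
import Mathlib
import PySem

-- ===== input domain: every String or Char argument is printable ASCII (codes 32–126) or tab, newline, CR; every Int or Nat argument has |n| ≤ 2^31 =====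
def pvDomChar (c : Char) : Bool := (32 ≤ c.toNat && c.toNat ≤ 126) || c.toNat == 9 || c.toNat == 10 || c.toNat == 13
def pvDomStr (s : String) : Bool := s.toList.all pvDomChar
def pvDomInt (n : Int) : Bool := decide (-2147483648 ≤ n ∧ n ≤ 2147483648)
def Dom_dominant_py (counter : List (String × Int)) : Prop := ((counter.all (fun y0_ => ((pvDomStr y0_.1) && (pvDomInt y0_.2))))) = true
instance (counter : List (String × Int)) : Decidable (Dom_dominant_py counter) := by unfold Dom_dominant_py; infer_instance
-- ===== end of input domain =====

-- B replaces A's sort-then-inspect with a single reduction keeping (best name, best count, tie count); same filtering, same return value.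

-- ===== PORT A =====
-- shared filtering helper: Python's  {str(k): int(v) for k, v in (counter or {}).items() if str(k)}
-- (str(k)/int(v) are identities on str/int keys and values; truthiness of str(k) is nonemptiness)
def pvFiltered (counter : List (String × Int)) : List (String × Int) :=
  (counter.foldl (fun d kv => if kv.1 ≠ "" then d.insert kv.1 kv.2 else d)
    (PySem.Dict.empty : PySem.Dict String Int)).items

def dominant_py (counter : List (String × Int)) : String × Int × Bool :=
  let filtered := pvFiltered counter
  if filtered = [] then ("", 0, false)
  else
    let ordered := PySem.List.sorted2 filtered (fun it => -it.2) (fun it => it.1)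
    match ordered with
    | [] => ("", 0, false)  -- unreachable: ordered is a permutation of the nonempty filtered list
    | (top_name, top_count) :: rest =>
      let tied := decide (((top_name, top_count) :: rest).length > 1) &&
        (match rest with
         | [] => false
         | q :: _ => decide (q.2 = top_count))
      (top_name, top_count, tied)

-- ===== PORT B =====
def pvAltStep (st : Option (String × Int × Int)) (kv : String × Int) : Option (String × Int × Int) :=
  match st with
  | none => some (kv.1, kv.2, 1)
  | some (bn, bc, t) =>
    if kv.2 > bc then some (kv.1, kv.2, 1)
    else if kv.2 = bc then some ((if kv.1 < bn then kv.1 else bn), bc, t + 1)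
    else some (bn, bc, t)

def dominant_py_alt (counter : List (String × Int)) : String × Int × Bool :=
  match (pvFiltered counter).foldl pvAltStep none with
  | none => ("", 0, false)
  | some (bn, bc, t) => (bn, bc, decide (t > 1))

-- ===== PRECONDITION & SPEC =====
def Spec_dominant_py (counter : List (String × Int)) (out : String × Int × Bool) : Prop := out = dominant_py_alt counter
instance (counter : List (String × Int)) (out : String × Int × Bool) : Decidable (Spec_dominant_py counter out) := by unfold Spec_dominant_py; infer_instance

-- ===== CLAIM (what is proved, stated in full; the proofs are below) =====
def Claim_equal_dominant_py : Prop := ∀ (counter : List (String × Int)), Dom_dominant_py counter → Spec_dominant_py counter (dominant_py counter)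

-- ===== LEMMAS AND PROOFS =====

/-- The sort key of A's `sorted(..., key=lambda item: (-item[1], item[0]))`, as a lexicographic pair. -/
def pvKey (p : String × Int) : Lex (Int × String) := toLex (-p.2, p.1)

theorem pvKey_inj : Function.Injective pvKey := by
  intro a b h
  have h' : ((-a.2 : Int), a.1) = ((-b.2 : Int), b.1) := toLex.injective h
  have h1 : a.1 = b.1 := congrArg Prod.snd h'
  have h2 : (-a.2 : Int) = -b.2 := congrArg Prod.fst h'
  exact Prod.ext h1 (by omega)

theorem pvKey_le_iff (a b : String × Int) :
    pvKey a ≤ pvKey b ↔ (b.2 < a.2 ∨ (a.2 = b.2 ∧ a.1 ≤ b.1)) := by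
  unfold pvKey
  rw [Prod.Lex.le_iff]
  simp only [ofLex_toLex]
  constructor
  · rintro (h | ⟨h, h'⟩)
    · exact Or.inl (by omega)
    · exact Or.inr ⟨by omega, h'⟩
  · rintro (h | ⟨h, h'⟩)
    · exact Or.inl (by omega)
    · exact Or.inr ⟨by omega, h'⟩

theorem pvKey_lt_iff (a b : String × Int) :
    pvKey a < pvKey b ↔ (b.2 < a.2 ∨ (a.2 = b.2 ∧ a.1 < b.1)) := by
  unfold pvKey
  rw [Prod.Lex.lt_iff]
  simp only [ofLex_toLex]
  constructor
  · rintro (h | ⟨h, h'⟩)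
    · exact Or.inl (by omega)
    · exact Or.inr ⟨by omega, h'⟩
  · rintro (h | ⟨h, h'⟩)
    · exact Or.inl (by omega)
    · exact Or.inr ⟨by omega, h'⟩

/-- A's sorted2 call is a foldl of insertBy with the key-comparison `before`. -/
theorem sorted2_eq_foldl (L : List (String × Int)) :
    PySem.List.sorted2 L (fun it => -it.2) (fun it => it.1) =
      L.foldl (fun acc x => PySem.List.insertBy (fun a b => decide (pvKey a < pvKey b)) x acc) [] := by
  have hbe : (fun (a b : String × Int) =>
      (decide ((-a.2 : Int) < -b.2) || (!decide ((-b.2 : Int) < -a.2) && decide (a.1 < b.1)))) =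
      fun a b => decide (pvKey a < pvKey b) := by
    funext a b
    rw [Bool.eq_iff_iff]
    simp only [Bool.or_eq_true, Bool.and_eq_true, Bool.not_eq_true', decide_eq_true_eq,
      decide_eq_false_iff_not]
    rw [pvKey_lt_iff]
    constructor
    · rintro (h | ⟨h, h'⟩)
      · exact Or.inl (by omega)
      · rcases lt_or_eq_of_le (show b.2 ≤ a.2 by omega) with h2 | h2
        · exact Or.inl h2
        · exact Or.inr ⟨h2.symm, h'⟩
    · rintro (h | ⟨h, h'⟩)
      · exact Or.inl (by omega)
      · exact Or.inr ⟨by omega, h'⟩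
  show L.foldl (fun acc x => PySem.List.insertBy
      (fun a b => (decide ((-a.2 : Int) < -b.2) || (!decide ((-b.2 : Int) < -a.2) && decide (a.1 < b.1)))) x acc) [] = _
  rw [hbe]

theorem foldl_insertBy_pairwise (L acc : List (String × Int))
    (h : acc.Pairwise (fun a b => pvKey a ≤ pvKey b)) :
    (L.foldl (fun acc x => PySem.List.insertBy (fun a b => decide (pvKey a < pvKey b)) x acc) acc).Pairwise
      (fun a b => pvKey a ≤ pvKey b) := by
  induction L generalizing acc with
  | nil => exact h
  | cons p L ih =>
    exact ih _ (PySem.List.insertBy_pairwise_le pvKey p acc h)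

theorem sorted2_pairwise_key (L : List (String × Int)) :
    (PySem.List.sorted2 L (fun it => -it.2) (fun it => it.1)).Pairwise (fun a b => pvKey a ≤ pvKey b) := by
  rw [sorted2_eq_foldl]
  exact foldl_insertBy_pairwise L [] List.Pairwise.nil

/-- The pure "running best (name, count)" step of B's loop. -/
def pvM (b p : String × Int) : String × Int :=
  if p.2 > b.2 then p else if p.2 = b.2 then ((if p.1 < b.1 then p.1 else b.1), b.2) else b

theorem pvM_or (b p : String × Int) : pvM b p = b ∨ pvM b p = p := by
  unfold pvM
  split_ifs with h1 h2 h3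
  · exact Or.inr rfl
  · exact Or.inr (Prod.ext rfl h2.symm)
  · exact Or.inl (Prod.ext rfl rfl)
  · exact Or.inl rfl

theorem pvM_le_left (b p : String × Int) : pvKey (pvM b p) ≤ pvKey b := by
  unfold pvM
  split_ifs with h1 h2 h3 <;> rw [pvKey_le_iff]
  · exact Or.inl h1
  · exact Or.inr ⟨rfl, le_of_lt h3⟩
  · exact Or.inr ⟨rfl, le_refl _⟩
  · exact Or.inr ⟨rfl, le_refl _⟩

theorem pvM_le_right (b p : String × Int) : pvKey (pvM b p) ≤ pvKey p := by
  unfold pvM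
  split_ifs with h1 h2 h3 <;> rw [pvKey_le_iff]
  · exact Or.inr ⟨rfl, le_refl _⟩
  · exact Or.inr ⟨h2.symm, le_refl _⟩
  · exact Or.inr ⟨h2.symm, le_of_not_gt h3⟩
  · exact Or.inl (by omega)

theorem foldM_min (L : List (String × Int)) (b : String × Int) :
    (L.foldl pvM b ∈ b :: L) ∧ (∀ p ∈ b :: L, pvKey (L.foldl pvM b) ≤ pvKey p) := by
  induction L generalizing b with
  | nil => exact ⟨List.mem_singleton.mpr rfl, by rintro p hp; rw [List.mem_singleton] at hp; subst hp; exact le_refl _⟩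
  | cons p L ih =>
    obtain ⟨hmem, hle⟩ := ih (pvM b p)
    constructor
    · rw [List.foldl_cons]
      rcases List.mem_cons.mp hmem with h | h
      · rcases pvM_or b p with h' | h'
        · rw [h, h']; exact List.mem_cons_self
        · rw [h, h']; exact List.mem_cons_of_mem _ List.mem_cons_self
      · exact List.mem_cons_of_mem _ (List.mem_cons_of_mem _ h)
    · intro q hq
      rw [List.foldl_cons]
      have hseed := hle (pvM b p) List.mem_cons_self
      rcases List.mem_cons.mp hq with rfl | h
      · exact le_trans hseed (pvM_le_left q p)
      · rcases List.mem_cons.mp h with rfl | h'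
        · exact le_trans hseed (pvM_le_right b q)
        · exact hle q (List.mem_cons_of_mem _ h')

theorem seed_snd_le_foldM (L : List (String × Int)) (b : String × Int) :
    b.2 ≤ (L.foldl pvM b).2 := by
  have h := (foldM_min L b).2 b List.mem_cons_self
  rw [pvKey_le_iff] at h
  rcases h with h | ⟨h, _⟩
  · exact le_of_lt h
  · exact le_of_eq h.symm

theorem foldAlt (L : List (String × Int)) (bn : String) (bc t : Int) :
    L.foldl pvAltStep (some (bn, bc, t)) =
      some ((L.foldl pvM (bn, bc)).1, (L.foldl pvM (bn, bc)).2,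
        (if (L.foldl pvM (bn, bc)).2 = bc then t else 0) +
          ((L.countP (fun p => decide (p.2 = (L.foldl pvM (bn, bc)).2)) : Int))) := by
  induction L generalizing bn bc t with
  | nil => simp
  | cons p L ih =>
    rw [List.foldl_cons, List.foldl_cons]
    by_cases h1 : p.2 > bc
    · have hstep : pvAltStep (some (bn, bc, t)) p = some (p.1, p.2, 1) := by
        simp [pvAltStep, h1]
      have hM : pvM (bn, bc) p = p := by simp [pvM, h1]
      have hp : (L.foldl pvM (p.1, p.2)) = L.foldl pvM p := by rw [Prod.mk.eta]
      rw [hstep, hM, ih p.1 p.2 1, hp]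
      have hge : p.2 ≤ (L.foldl pvM p).2 := seed_snd_le_foldM L p
      simp only [Option.some.injEq, Prod.mk.injEq, true_and]
      rw [List.countP_cons]
      by_cases hc : p.2 = (L.foldl pvM p).2 <;>
        simp [hc, eq_comm, show ¬ (L.foldl pvM p).2 = bc by omega] <;> omega
    · by_cases h2 : p.2 = bc
      · have hstep : pvAltStep (some (bn, bc, t)) p =
            some ((if p.1 < bn then p.1 else bn), bc, t + 1) := by
          simp [pvAltStep, h2]
        have hM : pvM (bn, bc) p = ((if p.1 < bn then p.1 else bn), bc) := by
          simp [pvM, h2]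
        rw [hstep, hM, ih]
        simp only [Option.some.injEq, Prod.mk.injEq, true_and]
        rw [List.countP_cons]
        by_cases hc : (L.foldl pvM ((if p.1 < bn then p.1 else bn), bc)).2 = bc <;>
          simp [hc, eq_comm] <;> omega
      · have hstep : pvAltStep (some (bn, bc, t)) p = some (bn, bc, t) := by
          simp [pvAltStep, h1, h2]
        have hM : pvM (bn, bc) p = (bn, bc) := by simp [pvM, h1, h2]
        rw [hstep, hM, ih]
        have hge : bc ≤ (L.foldl pvM (bn, bc)).2 := seed_snd_le_foldM L (bn, bc)
        simp only [Option.some.injEq, Prod.mk.injEq, true_and]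
        rw [List.countP_cons]
        simp [show ¬ p.2 = (L.foldl pvM (bn, bc)).2 by omega]

theorem main_eq (L : List (String × Int)) :
    (if L = [] then (("", 0, false) : String × Int × Bool)
     else
       match PySem.List.sorted2 L (fun it => -it.2) (fun it => it.1) with
       | [] => ("", 0, false)
       | (tn, tc) :: rest =>
         (tn, tc, decide (((tn, tc) :: rest).length > 1) &&
           (match rest with | [] => false | q :: _ => decide (q.2 = tc)))) =
    (match L.foldl pvAltStep none with
     | none => ("", 0, false)
     | some (bn, bc, t) => (bn, bc, decide (t > 1))) := by
  match L with
  | [] => rfl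
  | q :: L' =>
    have hperm : (PySem.List.sorted2 (q :: L') (fun it => -it.2) (fun it => it.1)).Perm (q :: L') :=
      PySem.List.sorted2_perm _ _ _ _
    have hpw := sorted2_pairwise_key (q :: L')
    match hS : PySem.List.sorted2 (q :: L') (fun it => -it.2) (fun it => it.1) with
    | [] =>
      rw [hS] at hperm
      have : (q :: L') = [] := List.nil_perm.mp hperm
      exact absurd this (by simp)
    | (tn, tc) :: rest =>
      rw [hS] at hperm hpw
      -- B side: the loop computes the running minimum and the count of top-count items
      set M := L'.foldl pvM q with hMdef
      have hq : (q.1, q.2) = q := Prod.mk.eta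
      have hfold : (q :: L').foldl pvAltStep none =
          some (M.1, M.2, (if M.2 = q.2 then 1 else 0) +
            ((L'.countP (fun p => decide (p.2 = M.2)) : Int))) := by
        rw [List.foldl_cons]
        show L'.foldl pvAltStep (some (q.1, q.2, 1)) = _
        rw [foldAlt, hq]
      obtain ⟨hMmem, hMmin⟩ := foldM_min L' q
      -- the head of the sorted list is that same minimum
      have hheadmem : (tn, tc) ∈ q :: L' := hperm.mem_iff.mp List.mem_cons_self
      have hheadmin : ∀ p ∈ q :: L', pvKey (tn, tc) ≤ pvKey p := by
        intro p hp
        rcases List.mem_cons.mp (hperm.mem_iff.mpr hp) with h | h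
        · exact h ▸ le_refl _
        · exact (List.pairwise_cons.mp hpw).1 p h
      have hhead : (tn, tc) = M := by
        apply pvKey_inj
        exact le_antisymm (hheadmin M hMmem) (hMmin (tn, tc) hheadmem)
      have htc : tc = M.2 := congrArg Prod.snd hhead
      have htn : tn = M.1 := congrArg Prod.fst hhead
      -- B's tie count is the number of elements carrying the top count
      have hcnt : (if M.2 = q.2 then (1 : Int) else 0) +
          ((L'.countP (fun p => decide (p.2 = M.2)) : Int)) =
          (((q :: L').countP (fun p => decide (p.2 = M.2)) : Nat) : Int) := by
        rw [List.countP_cons]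
        by_cases h : q.2 = M.2 <;> simp [h, eq_comm] <;> omega
      have hcnt2 : ((q :: L').countP (fun p => decide (p.2 = M.2))) =
          (((tn, tc) :: rest).countP (fun p => decide (p.2 = M.2))) :=
        (List.Perm.countP_eq _ hperm).symm
      have hcnt3 : (((tn, tc) :: rest).countP (fun p => decide (p.2 = M.2))) =
          rest.countP (fun p => decide (p.2 = M.2)) + 1 := by
        rw [List.countP_cons]
        simp [htc]
      have hT : (if M.2 = q.2 then (1 : Int) else 0) +
          ((L'.countP (fun p => decide (p.2 = M.2)) : Int)) =
          ((rest.countP (fun p => decide (p.2 = M.2)) : Int)) + 1 := by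
        rw [hcnt]
        exact_mod_cast hcnt2.trans hcnt3
      rw [hfold, if_neg (show ¬ (q :: L' = []) by simp)]
      show ((tn, tc,
          decide (((tn, tc) :: rest).length > 1) &&
            (match rest with | [] => false | r :: _ => decide (r.2 = tc))) : String × Int × Bool) =
        (M.1, M.2, decide ((if M.2 = q.2 then (1 : Int) else 0) +
          ((L'.countP (fun p => decide (p.2 = M.2)) : Int)) > 1))
      rw [hT]
      simp only [Prod.mk.injEq]
      refine ⟨htn, htc, ?_⟩
      -- the tie flags agree
      cases rest with
      | nil => simp
      | cons r rest' =>
        have hpwrest := (List.pairwise_cons.mp hpw).2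
        have hheadr : pvKey (tn, tc) ≤ pvKey r := (List.pairwise_cons.mp hpw).1 r List.mem_cons_self
        by_cases hr : r.2 = tc
        · have hcpos : 0 < ((r :: rest').countP (fun p => decide (p.2 = M.2))) := by
            rw [List.countP_cons, if_pos (decide_eq_true (show r.2 = M.2 from hr.trans htc))]
            omega
          have hL : (decide (((tn, tc) :: r :: rest').length > 1) && decide (r.2 = tc)) = true := by
            simp [hr]
          have hR : decide ((((r :: rest').countP (fun p => decide (p.2 = M.2)) : Nat) : Int) + 1 > 1)
              = true := decide_eq_true (by
                have h0 : (0 : Int) < (((r :: rest').countP (fun p => decide (p.2 = M.2)) : Nat) : Int) := by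
                  exact_mod_cast hcpos
                omega)
          rw [hL, hR]
        · have hczero : (r :: rest').countP (fun p => decide (p.2 = M.2)) = 0 := by
            rw [List.countP_eq_zero]
            intro p hp
            rcases List.mem_cons.mp hp with h | h
            · subst h; simp [← htc, hr]
            · have h1 : pvKey r ≤ pvKey p := (List.pairwise_cons.mp hpwrest).1 p h
              rw [pvKey_le_iff] at h1 hheadr
              have hrlt : r.2 < tc := by
                rcases hheadr with h' | ⟨h', _⟩
                · exact h'
                · exact absurd h'.symm hr
              have hplt : p.2 < tc := by rcases h1 with h' | ⟨h', _⟩ <;> omega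
              simp [← htc]
              omega
          rw [hczero]
          simp [hr]

-- ===== VERDICT (by name: the statement is the Claim_ definition above) =====
theorem dominant_py_spec : Claim_equal_dominant_py := by
  intro counter _
  unfold Spec_dominant_py dominant_py dominant_py_alt
  exact main_eq (pvFiltered counter)
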